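-- pv_equiv track=rewrite | github.com/SERG-Delft/sql-bug-finder | queries_stack_exchange/stack_exchange.py | build_sql_queries
-- ===== SOURCE A (Python) =====
-- def build_sql_queries(snippet_sql_lines):
--     queries = list()
--     sql_query = ''
--     for line in snippet_sql_lines:
--         if line != '' and line[-1] == ';':
--             if sql_query != '':
--                 sql_query += ' ' + line
--                 queries.append(sql_query)
--                 sql_query = ''
--             else:
--                 queries.append(line)
--         else:
--             if sql_query == '':
--                 sql_query += line
--             else:
--                 sql_query += ' ' + line
--     if sql_query != '':
--         queries.append(sql_query + ';')
--     return queries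
-- ===== SOURCE B (Python) =====
-- def build_sql_queries(snippet_sql_lines):
--     # First pass: group lines into (content_lines, terminating_line) pairs plus a trailing open group.
--     closed = []
--     cur = []
--     for line in snippet_sql_lines:
--         if line != '' and line.endswith(';'):
--             closed.append((cur, line))
--             cur = []
--         elif line != '' or cur:
--             cur.append(line)
--     # Second pass: render each closed group, then the trailing open group if any.
--     queries = [term if not group else ' '.join(group) + ' ' + term for group, term in closed]
--     if cur:
--         queries.append(' '.join(cur) + ';')
--     return queries
-- ===== Notes on version B (the rewrite author's own statement) =====
-- stated objective: alternative
-- what changed: Replaces the rolling string accumulator and its inline emit branches by two passes: one pass grouping lines into (content, terminator) groups, and a mapping pass rendering each group with ' '.join.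
import Mathlib
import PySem

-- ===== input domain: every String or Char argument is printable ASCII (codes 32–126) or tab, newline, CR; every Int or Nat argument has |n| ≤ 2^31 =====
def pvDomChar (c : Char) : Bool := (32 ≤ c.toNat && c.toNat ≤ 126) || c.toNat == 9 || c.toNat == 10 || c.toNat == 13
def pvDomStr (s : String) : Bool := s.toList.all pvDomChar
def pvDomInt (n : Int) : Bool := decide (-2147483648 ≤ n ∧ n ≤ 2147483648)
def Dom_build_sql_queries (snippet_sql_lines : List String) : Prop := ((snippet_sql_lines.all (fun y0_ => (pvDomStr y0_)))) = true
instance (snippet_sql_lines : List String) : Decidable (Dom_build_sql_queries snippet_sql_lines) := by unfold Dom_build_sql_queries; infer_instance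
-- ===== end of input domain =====

-- B replaces A's rolling string accumulator by two passes (group lines into
-- (content, terminator) groups, then render each group); alternative decomposition, same cost.


-- ===== PORT A =====
-- A's for-loop as structural recursion over the same state (queries, sql_query).
def pvALoop : List String → List String × String → List String × String
  | [], st => st
  | line :: rest, (queries, sql_query) =>
    if line ≠ "" ∧ PySem.Str.pyGet? line (-1) = some ';' then
      if sql_query ≠ "" then pvALoop rest (queries ++ [sql_query ++ " " ++ line], "")
      else pvALoop rest (queries ++ [line], "")
    else
      if sql_query = "" then pvALoop rest (queries, sql_query ++ line)
      else pvALoop rest (queries, sql_query ++ " " ++ line)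

def build_sql_queries (snippet_sql_lines : List String) : List String :=
  let st := pvALoop snippet_sql_lines ([], "")
  if st.2 ≠ "" then st.1 ++ [st.2 ++ ";"] else st.1

-- ===== PORT B =====
-- B's grouping pass: state is (closed groups, current open group of content lines).
def pvBLoop : List String → List (List String × String) × List String → List (List String × String) × List String
  | [], st => st
  | line :: rest, (closed, cur) =>
    if line ≠ "" ∧ PySem.Str.endswith line ";" then pvBLoop rest (closed ++ [(cur, line)], [])
    else if line ≠ "" ∨ cur ≠ [] then pvBLoop rest (closed, cur ++ [line])
    else pvBLoop rest (closed, cur)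

-- B's rendering of one closed group ('term if not group else ' '.join(group) + ' ' + term').
def pvRender (gt : List String × String) : String :=
  if gt.1 = [] then gt.2 else PySem.Str.join " " gt.1 ++ " " ++ gt.2

def build_sql_queries_alt (snippet_sql_lines : List String) : List String :=
  let st := pvBLoop snippet_sql_lines ([], [])
  let queries := st.1.map pvRender
  if st.2 ≠ [] then queries ++ [PySem.Str.join " " st.2 ++ ";"] else queries

-- ===== PRECONDITION & SPEC =====
def Spec_build_sql_queries (snippet_sql_lines : List String) (out : List String) : Prop := out = build_sql_queries_alt snippet_sql_lines
instance (snippet_sql_lines : List String) (out : List String) : Decidable (Spec_build_sql_queries snippet_sql_lines out) := by unfold Spec_build_sql_queries; infer_instance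

-- ===== CLAIM (what is proved, stated in full; the proofs are below) =====
def Claim_equal_build_sql_queries : Prop := ∀ (snippet_sql_lines : List String), Dom_build_sql_queries snippet_sql_lines → Spec_build_sql_queries snippet_sql_lines (build_sql_queries snippet_sql_lines)

-- ===== LEMMAS AND PROOFS =====

lemma chars_join_snoc (sep : List Char) (gs : List (List Char)) (x : List Char) (h : gs ≠ []) :
    PySem.Chars.join sep (gs ++ [x]) = PySem.Chars.join sep gs ++ sep ++ x := by
  induction gs with
  | nil => simp at h
  | cons p rest ih =>
    cases rest with
    | nil => simp [PySem.Chars.join_singleton, PySem.Chars.join_cons_cons]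
    | cons q r =>
      simp only [List.cons_append] at ih ⊢
      rw [PySem.Chars.join_cons_cons, ih (by simp), PySem.Chars.join_cons_cons]
      simp [List.append_assoc]

lemma joinSp_nil : PySem.Str.join " " [] = "" := by
  apply String.toList_inj.mp; simp [PySem.Str.toList_join, PySem.Chars.join_nil]

lemma joinSp_singleton (s : String) : PySem.Str.join " " [s] = s := by
  apply String.toList_inj.mp; simp [PySem.Str.toList_join, PySem.Chars.join_singleton]

lemma joinSp_snoc (g : List String) (l : String) (h : g ≠ []) :
    PySem.Str.join " " (g ++ [l]) = PySem.Str.join " " g ++ " " ++ l := by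
  apply String.toList_inj.mp
  simp only [PySem.Str.toList_join, List.map_append, List.map, String.toList_append]
  exact chars_join_snoc _ _ _ (by simp [h])

lemma guard_iff (line : String) (_h : line ≠ "") :
    (PySem.Str.pyGet? line (-1) = some ';') ↔ (PySem.Str.endswith line ";" = true) := by
  simp only [PySem.Str.pyGet?_eq, PySem.Chars.pyGet?_eq_listPyGet?, PySem.List.pyGet?_neg_one,
    PySem.Str.endswith_eq, String.reduceToList, PySem.Chars.endswith_iff]
  rw [List.getLast?_eq_some_iff]
  constructor
  · rintro ⟨t, ht⟩; exact ⟨t, ht.symm⟩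
  · rintro ⟨t, ht⟩; exact ⟨t, ht.symm⟩

-- Loop invariant: A's buffer is the space-join of B's open group, empty iff the group is.
lemma loop_eq (lines : List String) : ∀ (closed : List (List String × String)) (cur : List String)
    (buf : String), buf = PySem.Str.join " " cur → (buf = "" ↔ cur = []) →
    (pvALoop lines (closed.map pvRender, buf)).1 = ((pvBLoop lines (closed, cur)).1).map pvRender
    ∧ (pvALoop lines (closed.map pvRender, buf)).2 = PySem.Str.join " " (pvBLoop lines (closed, cur)).2
    ∧ ((pvALoop lines (closed.map pvRender, buf)).2 = "" ↔ (pvBLoop lines (closed, cur)).2 = []) := by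
  induction lines with
  | nil =>
    intro closed cur buf hj hiff
    exact ⟨rfl, hj, hiff⟩
  | cons line rest ih =>
    intro closed cur buf hj hiff
    rw [pvALoop, pvBLoop]
    by_cases hne : line = ""
    · -- empty line: never a terminator, never closes a group
      have hA : ¬ (line ≠ "" ∧ PySem.Str.pyGet? line (-1) = some ';') := by simp [hne]
      have hB : ¬ (line ≠ "" ∧ PySem.Str.endswith line ";" = true) := by simp [hne]
      rw [if_neg hA, if_neg hB]
      by_cases hbuf : buf = ""
      · have hcur : cur = [] := hiff.mp hbuf
        have hB2 : ¬ (line ≠ "" ∨ cur ≠ []) := by simp [hne, hcur]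
        rw [if_pos hbuf, if_neg hB2]
        exact ih closed cur (buf ++ line)
          (by rw [hbuf, hne, String.empty_append, hcur, joinSp_nil])
          (by rw [hbuf, hne, String.empty_append]; simpa using hcur)
      · have hcur : cur ≠ [] := fun hc => hbuf (hiff.mpr hc)
        rw [if_neg hbuf, if_pos (Or.inr hcur)]
        exact ih closed (cur ++ [line]) (buf ++ " " ++ line)
          (by rw [joinSp_snoc _ _ hcur, hj]) (by simp)
    · by_cases hterm : PySem.Str.endswith line ";" = true
      · -- terminator line: close the group
        have hp : PySem.Str.pyGet? line (-1) = some ';' := (guard_iff line hne).mpr hterm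
        by_cases hbuf : buf = ""
        · have hcur : cur = [] := hiff.mp hbuf
          have hmap : (closed.map pvRender) ++ [line] = (closed ++ [(cur, line)]).map pvRender := by
            simp [pvRender, hcur]
          rw [if_pos ⟨hne, hp⟩, if_neg (not_not_intro hbuf), if_pos ⟨hne, hterm⟩, hmap]
          exact ih _ [] "" (by rw [joinSp_nil]) (by simp)
        · have hcur : cur ≠ [] := fun hc => hbuf (hiff.mpr hc)
          have hmap : (closed.map pvRender) ++ [buf ++ " " ++ line]
              = (closed ++ [(cur, line)]).map pvRender := by
            simp [pvRender, hcur, hj]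
          rw [if_pos ⟨hne, hp⟩, if_pos hbuf, if_pos ⟨hne, hterm⟩, hmap]
          exact ih _ [] "" (by rw [joinSp_nil]) (by simp)
      · -- ordinary non-empty line: extend the group
        have hA : ¬ (line ≠ "" ∧ PySem.Str.pyGet? line (-1) = some ';') := by
          rintro ⟨-, hp⟩; exact hterm ((guard_iff line hne).mp hp)
        have hB : ¬ (line ≠ "" ∧ PySem.Str.endswith line ";" = true) := by
          rintro ⟨-, ht⟩; exact hterm ht
        by_cases hbuf : buf = ""
        · have hcur : cur = [] := hiff.mp hbuf
          rw [if_neg hA, if_pos hbuf, if_neg hB, if_pos (Or.inl hne), hcur]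
          exact ih closed ([] ++ [line]) (buf ++ line)
            (by rw [hbuf, String.empty_append, List.nil_append, joinSp_singleton])
            (by rw [hbuf, String.empty_append]; simp [hne])
        · have hcur : cur ≠ [] := fun hc => hbuf (hiff.mpr hc)
          rw [if_neg hA, if_neg hbuf, if_neg hB, if_pos (Or.inl hne)]
          exact ih closed (cur ++ [line]) (buf ++ " " ++ line)
            (by rw [joinSp_snoc _ _ hcur, hj]) (by simp)

-- ===== VERDICT (by name: the statement is the Claim_ definition above) =====
theorem build_sql_queries_spec : Claim_equal_build_sql_queries := by
  intro lines _
  unfold Spec_build_sql_queries build_sql_queries build_sql_queries_alt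
  obtain ⟨h1, h2, h3⟩ := loop_eq lines [] [] "" (by rw [joinSp_nil]) (by simp)
  simp only [List.map_nil] at h1 h2 h3
  by_cases hb : (pvBLoop lines ([], [])).2 = []
  · simp [h1, h3.mpr hb, hb]
  · have hA : (pvALoop lines ([], "")).2 ≠ "" := fun h => hb (h3.mp h)
    have hJ : PySem.Str.join " " (pvBLoop lines ([], [])).2 ≠ "" := h2 ▸ hA
    simp [h1, h2, hJ, hb]
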